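-- pv_equiv track=rewrite | github.com/Ashwin7501/missing-step-detection | src/step_extraction.py | _are_related_actions
-- ===== SOURCE A (Python) =====
-- def _are_related_actions(action1: str, action2: str) -> bool:
--     """Check if two actions are semantically related."""
--     related_groups = [
--         {'add', 'put', 'place', 'insert', 'pour'},
--         {'remove', 'take', 'get', 'pull'},
--         {'mix', 'stir', 'whisk', 'blend'},
--         {'heat', 'cook', 'boil', 'warm'},
--         {'cut', 'slice', 'chop', 'dice'},
--         {'wash', 'rinse', 'clean'},
--         {'dry', 'wipe', 'towel'},
--         {'open', 'start', 'begin', 'turn'},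
--         {'close', 'stop', 'end', 'finish'},
--         {'click', 'select', 'choose', 'press'},
--         {'enter', 'type', 'input', 'write'},
--         {'download', 'install', 'get'},
--         {'run', 'execute', 'start', 'launch'},
--         {'wait', 'pause', 'hold'},
--         {'check', 'verify', 'ensure', 'confirm'},
--     ]
--     for group in related_groups:
--         if action1 in group and action2 in group:
--             return True
--     return False
-- ===== SOURCE B (Python) =====
-- # Precompute a word -> set-of-related-words dict once; each call is one lookup + one membership test.
-- _GROUPS = [
--     "add put place insert pour",
--     "remove take get pull",
--     "mix stir whisk blend",
--     "heat cook boil warm",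
--     "cut slice chop dice",
--     "wash rinse clean",
--     "dry wipe towel",
--     "open start begin turn",
--     "close stop end finish",
--     "click select choose press",
--     "enter type input write",
--     "download install get",
--     "run execute start launch",
--     "wait pause hold",
--     "check verify ensure confirm",
-- ]
--
-- _RELATED = {}
-- for _g in _GROUPS:
--     _words = _g.split()
--     for _w in _words:
--         _RELATED.setdefault(_w, set()).update(_words)
--
--
-- def _are_related_actions(action1: str, action2: str) -> bool:
--     """Check if two actions are semantically related."""
--     return action2 in _RELATED.get(action1, set())
-- ===== Notes on version B (the rewrite author's own statement) =====
-- stated objective: idiomatic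
-- what changed: Replaces the per-call scan over all 15 group sets with a word-to-related-words dict built once at module load (groups kept as compact space-separated strings, split at build time); the function becomes one dict lookup plus one set-membership test.
import Mathlib
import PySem

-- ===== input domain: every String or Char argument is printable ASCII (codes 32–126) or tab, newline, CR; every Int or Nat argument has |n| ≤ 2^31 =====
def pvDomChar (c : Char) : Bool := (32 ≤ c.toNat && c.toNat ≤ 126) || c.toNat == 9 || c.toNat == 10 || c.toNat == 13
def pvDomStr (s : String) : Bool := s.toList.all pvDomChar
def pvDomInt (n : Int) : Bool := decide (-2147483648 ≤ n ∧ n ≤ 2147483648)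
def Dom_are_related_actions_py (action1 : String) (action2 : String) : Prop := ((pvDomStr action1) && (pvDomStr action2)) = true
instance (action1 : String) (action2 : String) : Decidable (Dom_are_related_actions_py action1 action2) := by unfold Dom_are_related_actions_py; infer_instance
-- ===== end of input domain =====

-- B replaces A's per-call scan of the 15 group sets by a word -> related-words dict
-- built once from compact space-separated group strings; a call is one lookup + one membership test.


-- ===== PORT A =====
-- the 15 set literals of A (each literal has distinct elements, so Set.ofList keeps them all)
def aGroups : List (PySem.Set String) :=
  [PySem.Set.ofList ["add","put","place","insert","pour"],
   PySem.Set.ofList ["remove","take","get","pull"],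
   PySem.Set.ofList ["mix","stir","whisk","blend"],
   PySem.Set.ofList ["heat","cook","boil","warm"],
   PySem.Set.ofList ["cut","slice","chop","dice"],
   PySem.Set.ofList ["wash","rinse","clean"],
   PySem.Set.ofList ["dry","wipe","towel"],
   PySem.Set.ofList ["open","start","begin","turn"],
   PySem.Set.ofList ["close","stop","end","finish"],
   PySem.Set.ofList ["click","select","choose","press"],
   PySem.Set.ofList ["enter","type","input","write"],
   PySem.Set.ofList ["download","install","get"],
   PySem.Set.ofList ["run","execute","start","launch"],
   PySem.Set.ofList ["wait","pause","hold"],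
   PySem.Set.ofList ["check","verify","ensure","confirm"]]

-- A's loop with early 'return True' and final 'return False' is List.any over the groups
def are_related_actions_py (action1 : String) (action2 : String) : Bool :=
  aGroups.any (fun g => PySem.Set.contains g action1 && PySem.Set.contains g action2)

-- ===== PORT B =====
-- Source B's _GROUPS: the groups as compact space-separated strings, split at build time
def bGroups : List String :=
  ["add put place insert pour",
   "remove take get pull",
   "mix stir whisk blend",
   "heat cook boil warm",
   "cut slice chop dice",
   "wash rinse clean",
   "dry wipe towel",
   "open start begin turn",
   "close stop end finish",
   "click select choose press",
   "enter type input write",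
   "download install get",
   "run execute start launch",
   "wait pause hold",
   "check verify ensure confirm"]

-- the module-level build: _RELATED.setdefault(w, set()).update(words) is Dict.modify w ∅ (Set.update · words)
-- (the dict is only looked up afterwards, so Python's set-iteration order cannot affect the result)
def bRelated : PySem.Dict String (PySem.Set String) :=
  bGroups.foldl
    (fun d g =>
      let words := PySem.Str.split₀ g
      words.foldl (fun d w => d.modify w PySem.Set.empty (fun s => PySem.Set.update s words)) d)
    PySem.Dict.empty

def are_related_actions_py_alt (action1 : String) (action2 : String) : Bool :=
  PySem.Set.contains (PySem.Dict.getD bRelated action1 PySem.Set.empty) action2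

-- ===== PRECONDITION & SPEC =====
def Spec_are_related_actions_py (action1 : String) (action2 : String) (out : Bool) : Prop := out = are_related_actions_py_alt action1 action2
instance (action1 : String) (action2 : String) (out : Bool) : Decidable (Spec_are_related_actions_py action1 action2 out) := by unfold Spec_are_related_actions_py; infer_instance

-- ===== CLAIM =====
def Claim_equal_are_related_actions_py : Prop := ∀ (action1 : String) (action2 : String), Dom_are_related_actions_py action1 action2 → Spec_are_related_actions_py action1 action2 (are_related_actions_py action1 action2)

-- ===== LEMMAS AND PROOFS =====

-- the fifteen groups as raw word lists (what each of Source B's strings splits into)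
def rawLists : List (List String) :=
  [["add","put","place","insert","pour"],
   ["remove","take","get","pull"],
   ["mix","stir","whisk","blend"],
   ["heat","cook","boil","warm"],
   ["cut","slice","chop","dice"],
   ["wash","rinse","clean"],
   ["dry","wipe","towel"],
   ["open","start","begin","turn"],
   ["close","stop","end","finish"],
   ["click","select","choose","press"],
   ["enter","type","input","write"],
   ["download","install","get"],
   ["run","execute","start","launch"],
   ["wait","pause","hold"],
   ["check","verify","ensure","confirm"]]

lemma split_bGroups : bGroups.map PySem.Str.split₀ = rawLists := by decide

lemma aGroups_eq : aGroups = rawLists.map PySem.Set.ofList := by decide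

-- updating a set with elements it already has is a no-op
lemma update_of_subset (s : PySem.Set String) (l : List String) (h : ∀ x ∈ l, x ∈ s) :
    PySem.Set.update s l = s := by
  induction l generalizing s with
  | nil => rfl
  | cons x l ih =>
      have hx : x ∈ s := h x (by simp)
      have hadd : PySem.Set.add s x = s := by
        simp [PySem.Set.add, hx]
      show (x :: l).foldl PySem.Set.add s = s
      rw [List.foldl_cons]
      show PySem.Set.update (PySem.Set.add s x) l = s
      rw [hadd]
      exact ih s (fun y hy => h y (by simp [hy]))

lemma update_idem (s : PySem.Set String) (l : List String) :
    PySem.Set.update (PySem.Set.update s l) l = PySem.Set.update s l :=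
  update_of_subset _ _ (fun x hx => (PySem.Set.mem_update _ _ _).mpr (Or.inr hx))

-- the inner setdefault/update loop, characterised at one key
lemma getD_inner (l ws : List String) (d : PySem.Dict String (PySem.Set String)) (x : String) :
    (l.foldl (fun d w => d.modify w PySem.Set.empty (fun s => PySem.Set.update s ws)) d).getD x PySem.Set.empty
      = if x ∈ l then PySem.Set.update (d.getD x PySem.Set.empty) ws
        else d.getD x PySem.Set.empty := by
  induction l generalizing d with
  | nil => simp
  | cons w l ih =>
      rw [List.foldl_cons, ih, PySem.Dict.getD_modify]
      by_cases hxw : x = w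
      · by_cases hxl : x ∈ l <;> simp [hxw, hxl, update_idem]
      · by_cases hxl : x ∈ l <;> simp [hxw, hxl]

-- the outer loop over the group strings, characterised as membership
lemma mem_getD_fold (gs : List String) (d : PySem.Dict String (PySem.Set String)) (x y : String) :
    y ∈ (gs.foldl
          (fun d g =>
            let words := PySem.Str.split₀ g
            words.foldl (fun d w => d.modify w PySem.Set.empty (fun s => PySem.Set.update s words)) d)
          d).getD x PySem.Set.empty
      ↔ (∃ g ∈ gs, x ∈ PySem.Str.split₀ g ∧ y ∈ PySem.Str.split₀ g) ∨ y ∈ d.getD x PySem.Set.empty := by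
  induction gs generalizing d with
  | nil => simp
  | cons g gs ih =>
      rw [List.foldl_cons]
      simp only []
      rw [ih, getD_inner]
      by_cases hx : x ∈ PySem.Str.split₀ g
      · rw [if_pos hx]
        simp only [PySem.Set.mem_update, List.mem_cons]
        aesop
      · rw [if_neg hx]
        simp only [List.mem_cons]
        aesop

lemma B_iff (a b : String) :
    are_related_actions_py_alt a b = true ↔ ∃ ws ∈ rawLists, a ∈ ws ∧ b ∈ ws := by
  rw [are_related_actions_py_alt, PySem.Set.contains_iff, bRelated, mem_getD_fold]
  constructor
  · rintro (⟨g, hg, hag, hbg⟩ | h)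
    · exact ⟨PySem.Str.split₀ g, by rw [← split_bGroups]; exact List.mem_map_of_mem hg, hag, hbg⟩
    · simp [PySem.Dict.getD_empty, PySem.Set.empty] at h
  · rintro ⟨ws, hws, haw, hbw⟩
    rw [← split_bGroups] at hws
    obtain ⟨g, hg, rfl⟩ := List.mem_map.mp hws
    exact Or.inl ⟨g, hg, haw, hbw⟩

lemma A_iff (a b : String) :
    are_related_actions_py a b = true ↔ ∃ ws ∈ rawLists, a ∈ ws ∧ b ∈ ws := by
  rw [are_related_actions_py, List.any_eq_true, aGroups_eq]
  constructor
  · rintro ⟨s, hs, hc⟩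
    rw [Bool.and_eq_true, PySem.Set.contains_iff, PySem.Set.contains_iff] at hc
    obtain ⟨ws, hws, rfl⟩ := List.mem_map.mp hs
    exact ⟨ws, hws, (PySem.Set.mem_ofList _ _).mp hc.1, (PySem.Set.mem_ofList _ _).mp hc.2⟩
  · rintro ⟨ws, hws, haw, hbw⟩
    refine ⟨PySem.Set.ofList ws, List.mem_map_of_mem hws, ?_⟩
    rw [Bool.and_eq_true, PySem.Set.contains_iff, PySem.Set.contains_iff]
    exact ⟨(PySem.Set.mem_ofList _ _).mpr haw, (PySem.Set.mem_ofList _ _).mpr hbw⟩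

-- ===== VERDICT =====
theorem are_related_actions_py_spec : Claim_equal_are_related_actions_py := by
  intro a b _
  unfold Spec_are_related_actions_py
  rw [Bool.eq_iff_iff]
  exact (A_iff a b).trans (B_iff a b).symm
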